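-- pv_equiv track=rewrite | github.com/simba3447/algorithm-problem-solving | baekjoon/5568/5568_2.py | count_integer
-- ===== SOURCE A (Python) =====
-- def count_integer(card_list, k):
--     integer_set = set()
--     def count_integer_rec(card_list, k, integer):
--         if k == 0:
--             integer_set.add(integer)
--
--         for i in range(len(card_list)):
--             card = card_list[i]
--             rest_card_list = card_list[:i] + card_list[i+1:]
--             count_integer_rec(rest_card_list, k-1, integer + card)
--
--     count_integer_rec(card_list, k, '')
--
--     return len(integer_set)
-- ===== SOURCE B (Python) =====
-- import itertools
--
--
-- def count_integer(card_list, k):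
--     if k > len(card_list):
--         return 0
--     return len({''.join(p) for p in itertools.permutations(card_list, k)})
-- ===== Notes on version B (the rewrite author's own statement) =====
-- stated objective: idiomatic
-- what changed: Replaces the mutating recursive helper that walks the whole permutation tree of every length (recording strings only at depth k) with a flat set-comprehension over itertools.permutations(card_list, k), short-circuiting to 0 when k exceeds the number of cards.
-- outside the precondition, e.g. on count_integer(['1'], -1): A returns 0, B raises ValueError
import Mathlib
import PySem

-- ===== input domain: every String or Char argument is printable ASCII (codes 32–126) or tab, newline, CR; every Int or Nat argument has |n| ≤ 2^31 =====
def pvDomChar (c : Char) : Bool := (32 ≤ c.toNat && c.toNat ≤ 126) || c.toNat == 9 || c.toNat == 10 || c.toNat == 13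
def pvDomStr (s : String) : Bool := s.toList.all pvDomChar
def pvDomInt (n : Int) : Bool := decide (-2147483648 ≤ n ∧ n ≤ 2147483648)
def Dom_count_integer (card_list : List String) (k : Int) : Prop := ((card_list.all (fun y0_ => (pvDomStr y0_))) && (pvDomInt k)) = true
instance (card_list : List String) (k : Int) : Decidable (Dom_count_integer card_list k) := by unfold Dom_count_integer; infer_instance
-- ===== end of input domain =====

-- B replaces A's mutating recursive helper (which walks the permutation tree of every length)
-- by a flat set-comprehension over itertools.permutations(card_list, k); equal counts proved for k ≥ 0
-- (for k < 0, A returns 0 while itertools.permutations raises ValueError — excluded by Pre_).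


-- ===== PORT A =====
-- count_integer_rec: mutates integer_set; ported as state passed through and returned.
-- card_list[i] for i < len is exact as cl[i]'h; card_list[:i] + card_list[i+1:] as slice ++ slice.
def countIntegerRecA (cl : List String) (k : Int) (integer : String) (st : PySem.Set String) :
    PySem.Set String :=
  let st0 := if k = 0 then PySem.Set.add st integer else st
  (List.range cl.length).attach.foldl
    (fun acc i =>
      let card := cl[i.1]'(by have := i.2; simp_all)
      let rest := PySem.List.slice cl none (some (i.1 : Int)) ++
                  PySem.List.slice cl (some ((i.1 : Int) + 1)) none
      countIntegerRecA rest (k - 1) (integer ++ card) acc)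
    st0
  termination_by cl.length
  decreasing_by
    have hi : i.1 < cl.length := by have := i.2; simp_all
    rw [PySem.List.slice_to_natCast]
    rw [show ((i.1 : Int) + 1) = ((i.1 + 1 : Nat) : Int) by push_cast; ring]
    rw [PySem.List.slice_from_natCast]
    simp only [List.length_append, List.length_take, List.length_drop]
    omega

def count_integer (card_list : List String) (k : Int) : Int :=
  ((countIntegerRecA card_list k "" PySem.Set.empty).length : Int)

-- ===== PORT B =====
-- len({''.join(p) for p in itertools.permutations(card_list, k)}); Pre_ gives 0 ≤ k
-- (itertools.permutations raises ValueError for negative k), so k.toNat = k there.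
def count_integer_alt (card_list : List String) (k : Int) : Int :=
  if k > (card_list.length : Int) then 0
  else ((PySem.Set.ofList
      ((PySem.List.permutations card_list k.toNat).map
        (fun p => PySem.Str.join "" p))).length : Int)

-- ===== PRECONDITION & SPEC =====
-- Pre_ excludes negative k (outside the natural domain of the card count): A's exhaustive
-- recursion returns 0 there, while B's itertools.permutations raises ValueError.
def Pre_count_integer (card_list : List String) (k : Int) : Prop := 0 ≤ k
instance (card_list : List String) (k : Int) : Decidable (Pre_count_integer card_list k) := by
  unfold Pre_count_integer; infer_instance
def pvWitness_count_integer : List String × Int := (["1", "2", "1"], 2)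

def Spec_count_integer (card_list : List String) (k : Int) (out : Int) : Prop := out = count_integer_alt card_list k
instance (card_list : List String) (k : Int) (out : Int) : Decidable (Spec_count_integer card_list k out) := by unfold Spec_count_integer; infer_instance

-- ===== CLAIM (what is proved, stated in full; the proofs are below) =====
def Claim_equal_count_integer : Prop := ∀ (card_list : List String) (k : Int), Dom_count_integer card_list k → Pre_count_integer card_list k → Spec_count_integer card_list k (count_integer card_list k)

-- ===== LEMMAS AND PROOFS =====

-- ''.join(a :: l) = a ++ ''.join(l), via the Chars bridge.
lemma str_join_empty_cons (a : String) (l : List String) :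
    PySem.Str.join "" (a :: l) = a ++ PySem.Str.join "" l := by
  apply String.toList_inj.mp
  cases l with
  | nil =>
      simp [PySem.Str.toList_join, PySem.Chars.join_nil, PySem.Chars.join_singleton,
        String.toList_append]
  | cons q t =>
      simp [PySem.Str.toList_join, String.toList_append, PySem.Chars.join_cons_cons]

-- A's recursion adds nothing once k is negative: the k == 0 branch can never fire again.
lemma recA_neg (n : Nat) : ∀ (cl : List String), cl.length = n → ∀ (k : Int), k < 0 →
    ∀ (integer : String) (st : PySem.Set String), countIntegerRecA cl k integer st = st := by
  induction n using Nat.strong_induction_on with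
  | _ n ih =>
    intro cl hn k hk integer st
    rw [countIntegerRecA.eq_def]
    simp only [show ¬ k = 0 from by omega, if_false]
    generalize (List.range cl.length).attach = is
    induction is generalizing st with
    | nil => rfl
    | cons i is ihl =>
        simp only [List.foldl_cons]
        have hi : i.1 < cl.length := by have := i.2; simp_all
        have hrest : PySem.List.slice cl none (some (i.1 : Int)) ++
            PySem.List.slice cl (some ((i.1 : Int) + 1)) none = cl.eraseIdx i.1 := by
          rw [PySem.List.slice_to_natCast,
            show ((i.1 : Int) + 1) = ((i.1 + 1 : Nat) : Int) by push_cast; ring,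
            PySem.List.slice_from_natCast, List.eraseIdx_eq_take_drop_succ]
        have hlen : (cl.eraseIdx i.1).length < n := by
          rw [List.length_eraseIdx_of_lt hi]; omega
        rw [hrest, ih _ hlen _ rfl _ (by omega)]
        exact ihl st

-- PySem.List.permutations unfolded at a successor length, with the match written as Option.elim.
lemma permutations_succ (xs : List String) (r : Nat) : PySem.List.permutations xs (r+1) =
    (List.range xs.length).flatMap (fun i =>
      (xs[i]?).elim ([] : List (List String))
        (fun c => (PySem.List.permutations (xs.eraseIdx i) r).map (fun p => c :: p))) := by
  rw [PySem.List.permutations]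
  refine congrArg (fun f => List.flatMap f (List.range xs.length)) ?_
  funext i
  cases h : xs[i]? <;> rfl

-- No permutations longer than the list exist.
lemma permutations_nil_of_lt (r : Nat) : ∀ (xs : List String), xs.length < r →
    PySem.List.permutations xs r = [] := by
  induction r with
  | zero => intro xs h; omega
  | succ r ihr =>
      intro xs h
      rw [permutations_succ]
      rw [List.flatMap_eq_nil_iff]
      intro i hi
      have hilt : i < xs.length := List.mem_range.mp hi
      rw [List.getElem?_eq_getElem hilt]
      have : (xs.eraseIdx i).length < r := by
        rw [List.length_eraseIdx_of_lt hilt]; omega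
      simp [ihr _ this]

-- The state A's recursion returns is exactly st folded with the joins of the
-- length-k.toNat permutations, each prefixed by the accumulator string.
lemma recA_eq_foldl (n : Nat) : ∀ (cl : List String), cl.length = n → ∀ (k : Int), 0 ≤ k →
    ∀ (integer : String) (st : PySem.Set String),
      countIntegerRecA cl k integer st =
        ((PySem.List.permutations cl k.toNat).map
            (fun p => integer ++ PySem.Str.join "" p)).foldl PySem.Set.add st := by
  induction n using Nat.strong_induction_on with
  | _ n ih =>
    intro cl hn k hk integer st
    rcases eq_or_lt_of_le hk with hk0 | hkpos
    · -- k = 0: the branch adds `integer`; all recursive calls have negative k.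
      rw [countIntegerRecA.eq_def, ← hk0]
      simp only [reduceIte]
      have hj : integer ++ PySem.Str.join "" [] = integer := by
        have h0 : PySem.Str.join "" ([] : List String) = "" := by
          apply String.toList_inj.mp
          simp [PySem.Str.toList_join, PySem.Chars.join_nil]
        rw [h0]; simp
      rw [show PySem.List.permutations cl (0 : Int).toNat = [[]] from rfl]
      simp only [List.map_cons, List.map_nil, List.foldl_cons, List.foldl_nil, hj]
      generalize (List.range cl.length).attach = is
      generalize PySem.Set.add st integer = st1
      induction is generalizing st1 with
      | nil => rfl
      | cons i is ihl =>
          simp only [List.foldl_cons]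
          have hi : i.1 < cl.length := by have := i.2; simp_all
          have hrest : PySem.List.slice cl none (some (i.1 : Int)) ++
              PySem.List.slice cl (some ((i.1 : Int) + 1)) none = cl.eraseIdx i.1 := by
            rw [PySem.List.slice_to_natCast,
              show ((i.1 : Int) + 1) = ((i.1 + 1 : Nat) : Int) by push_cast; ring,
              PySem.List.slice_from_natCast, List.eraseIdx_eq_take_drop_succ]
          rw [hrest, recA_neg _ _ rfl _ (by omega)]
          exact ihl _
    · -- k > 0: the branch does not fire; fold of the recursive calls = fold over the flatMap.
      have hk0 : ¬ k = 0 := by omega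
      rw [countIntegerRecA.eq_def]
      simp only [hk0, if_false]
      obtain ⟨r, hr⟩ : ∃ r : Nat, k.toNat = r + 1 := ⟨(k - 1).toNat, by omega⟩
      rw [hr, permutations_succ, List.map_flatMap, List.foldl_flatMap]
      have hfold :
          ∀ (is : List {x // x ∈ List.range cl.length}) (acc : PySem.Set String),
            is.foldl (fun acc i =>
              countIntegerRecA
                (PySem.List.slice cl none (some (i.1 : Int)) ++
                  PySem.List.slice cl (some ((i.1 : Int) + 1)) none)
                (k - 1) (integer ++ cl[i.1]'(by have := i.2; simp_all)) acc) acc =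
            is.foldl (fun acc (i : {x // x ∈ List.range cl.length}) =>
              (((cl[i.1]?).elim ([] : List (List String))
                  (fun c => (PySem.List.permutations (cl.eraseIdx i.1) r).map
                    (fun p => c :: p))).map
                  (fun p => integer ++ PySem.Str.join "" p)).foldl PySem.Set.add acc) acc := by
        intro is
        induction is with
        | nil => intro acc; rfl
        | cons i is ihl =>
            intro acc
            simp only [List.foldl_cons]
            have hi : i.1 < cl.length := by have := i.2; simp_all
            have hrest : PySem.List.slice cl none (some (i.1 : Int)) ++
                PySem.List.slice cl (some ((i.1 : Int) + 1)) none = cl.eraseIdx i.1 := by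
              rw [PySem.List.slice_to_natCast,
                show ((i.1 : Int) + 1) = ((i.1 + 1 : Nat) : Int) by push_cast; ring,
                PySem.List.slice_from_natCast, List.eraseIdx_eq_take_drop_succ]
            have hlen : (cl.eraseIdx i.1).length < n := by
              rw [List.length_eraseIdx_of_lt hi]; omega
            have hstep := ih _ hlen _ rfl (k - 1) (by omega) (integer ++ cl[i.1]'hi) acc
            rw [hrest, hstep]
            have hget : cl[i.1]? = some (cl[i.1]'hi) := List.getElem?_eq_getElem hi
            have hmatch : (cl[i.1]?).elim ([] : List (List String))
                  (fun c => (PySem.List.permutations (cl.eraseIdx i.1) r).map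
                    (fun p => c :: p)) =
                (PySem.List.permutations (cl.eraseIdx i.1) r).map
                  (fun p => cl[i.1]'hi :: p) := by
              rw [hget]; rfl
            rw [hmatch, List.map_map]
            have hfun : ((fun p => integer ++ PySem.Str.join "" p) ∘
                (fun p => cl[i.1]'hi :: p)) =
                (fun p => (integer ++ cl[i.1]'hi) ++ PySem.Str.join "" p) := by
              funext p
              simp only [Function.comp_apply, str_join_empty_cons]
              rw [String.append_assoc]
            rw [hfun, show (k - 1).toNat = r from by omega]
            exact ihl _
      rw [hfold]
      exact List.foldl_attach
        (f := fun acc i =>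
          (((cl[i]?).elim ([] : List (List String))
              (fun c => (PySem.List.permutations (cl.eraseIdx i) r).map
                (fun p => c :: p))).map
            (fun p => integer ++ PySem.Str.join "" p)).foldl PySem.Set.add acc)

-- ===== VERDICT (by name: the statement is the Claim_ definition above) =====
theorem count_integer_spec : Claim_equal_count_integer := by
  intro card_list k _ hpre
  show _ = _
  unfold count_integer count_integer_alt
  rw [recA_eq_foldl _ card_list rfl k hpre]
  by_cases hgt : (card_list.length : Int) < k
  · rw [if_pos hgt, permutations_nil_of_lt _ _ (by omega)]
    rfl
  · rw [if_neg hgt, PySem.Set.ofList_eq_foldl]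
    have hfun : (fun p => "" ++ PySem.Str.join "" p) = (fun p : List String => PySem.Str.join "" p) := by
      funext p; simp
    rw [hfun]
    rfl
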